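-- pv_equiv track=rewrite | github.com/audi1099/Homework | Tasks/Week28/Task1/57.py | coordinate
-- ===== SOURCE A (Python) =====
-- def coordinate(start_x, start_y, directions):
--     if not isinstance(start_x, int) or not isinstance(start_y, int):
--         raise ValueError("Начальные координаты должны быть целыми числами")
--     if not isinstance(directions, str):
--         raise ValueError("Начальные данные для направлений должны быть строкой")
--     x, y = start_x, start_y
--     for direction in directions:
--         if direction == 'S':
--             y -= 1
--         elif direction == 'N':
--             y += 1
--         elif direction == 'W':
--             x -= 1
--         elif direction == 'E':
--             x += 1
--     return x, y
-- ===== SOURCE B (Python) =====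
-- def coordinate(start_x, start_y, directions):
--     if not isinstance(start_x, int) or not isinstance(start_y, int):
--         raise ValueError("Начальные координаты должны быть целыми числами")
--     if not isinstance(directions, str):
--         raise ValueError("Начальные данные для направлений должны быть строкой")
--     tally = {}
--     for d in directions:
--         tally[d] = tally.get(d, 0) + 1
--     return (start_x + tally.get('E', 0) - tally.get('W', 0),
--             start_y + tally.get('N', 0) - tally.get('S', 0))
-- ===== Notes on version B (the rewrite author's own statement) =====
-- stated objective: alternative
-- what changed: B replaces the stepwise walk with a 4-way branch by one frequency-tally pass (a dict counter) and computes the final point arithmetically from the counts of 'E','W','N','S'.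
import Mathlib
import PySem

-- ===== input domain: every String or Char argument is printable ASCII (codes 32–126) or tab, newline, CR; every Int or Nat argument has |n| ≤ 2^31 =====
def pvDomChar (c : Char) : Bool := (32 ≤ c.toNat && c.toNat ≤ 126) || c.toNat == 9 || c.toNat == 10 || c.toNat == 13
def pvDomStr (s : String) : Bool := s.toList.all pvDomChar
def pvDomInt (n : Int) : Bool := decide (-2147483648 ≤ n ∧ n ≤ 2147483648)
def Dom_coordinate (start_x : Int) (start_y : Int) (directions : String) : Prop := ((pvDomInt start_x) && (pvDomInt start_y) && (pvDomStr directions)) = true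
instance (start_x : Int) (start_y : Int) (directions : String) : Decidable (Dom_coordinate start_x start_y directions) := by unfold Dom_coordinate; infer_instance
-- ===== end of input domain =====

-- B replaces A's stepwise walk (4-way branch per character) by one frequency-tally
-- pass over the string and a closed arithmetic combination of the four direction counts.


-- ===== PORT A =====
-- the isinstance guards cannot fire under the type convention (Int/Int/String are given)
def coordinate (start_x : Int) (start_y : Int) (directions : String) : Int × Int :=
  directions.toList.foldl
    (fun (p : Int × Int) direction =>
      if direction = 'S' then (p.1, p.2 - 1)
      else if direction = 'N' then (p.1, p.2 + 1)
      else if direction = 'W' then (p.1 - 1, p.2)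
      else if direction = 'E' then (p.1 + 1, p.2)
      else p)
    (start_x, start_y)

-- ===== PORT B =====
def coordinate_alt (start_x : Int) (start_y : Int) (directions : String) : Int × Int :=
  let tally : PySem.Dict Char Int :=
    directions.toList.foldl (fun d c => d.insert c (d.getD c 0 + 1)) PySem.Dict.empty
  (start_x + tally.getD 'E' 0 - tally.getD 'W' 0,
   start_y + tally.getD 'N' 0 - tally.getD 'S' 0)

-- ===== PRECONDITION & SPEC =====
def Spec_coordinate (start_x : Int) (start_y : Int) (directions : String) (out : Int × Int) : Prop := out = coordinate_alt start_x start_y directions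
instance (start_x : Int) (start_y : Int) (directions : String) (out : Int × Int) : Decidable (Spec_coordinate start_x start_y directions out) := by unfold Spec_coordinate; infer_instance

-- ===== CLAIM (what is proved, stated in full; the proofs are below) =====
def Claim_equal_coordinate : Prop := ∀ (start_x : Int) (start_y : Int) (directions : String), Dom_coordinate start_x start_y directions → Spec_coordinate start_x start_y directions (coordinate start_x start_y directions)

-- ===== LEMMAS AND PROOFS =====

-- A's walk, characterised by the four character counts
theorem coordinate_foldl_counts (l : List Char) (x y : Int) :
    l.foldl
      (fun (p : Int × Int) direction =>
        if direction = 'S' then (p.1, p.2 - 1)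
        else if direction = 'N' then (p.1, p.2 + 1)
        else if direction = 'W' then (p.1 - 1, p.2)
        else if direction = 'E' then (p.1 + 1, p.2)
        else p)
      (x, y)
    = (x + l.count 'E' - l.count 'W', y + l.count 'N' - l.count 'S') := by
  induction l generalizing x y with
  | nil => simp
  | cons c t ih =>
    by_cases hS : c = 'S' <;> by_cases hN : c = 'N' <;> by_cases hW : c = 'W' <;>
      by_cases hE : c = 'E' <;>
      simp_all [List.foldl_cons] <;> (try constructor) <;> omega

-- ===== VERDICT (by name: the statement is the Claim_ definition above) =====
theorem coordinate_spec : Claim_equal_coordinate := by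
  intro sx sy dirs _
  unfold Spec_coordinate coordinate coordinate_alt
  rw [coordinate_foldl_counts]
  simp [PySem.Dict.foldl_insert_getD_add_one_eq_counter, PySem.Dict.getD_counter]
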